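-- pv_equiv track=rewrite | github.com/warshmellow/warshmellow-cses | apartments.py | f
-- ===== SOURCE A (Python) =====
-- def f(k, a, b):
--     a.sort()
--     b.sort()
--
--     i = 0
--     j = 0
--     n = len(a)
--     m = len(b)
--
--     count = 0
--     while i < n and j < m:
--         ai = a[i]
--         bj = b[j]
--         if bj - k <= ai <= bj + k:
--             count += 1
--             i += 1
--             j += 1
--         elif ai < bj - k:
--             i += 1
--         elif bj + k < ai:
--             j += 1
--     return count
-- ===== SOURCE B (Python) =====
-- def f(k, a, b):
--     a.sort()
--     b.sort()
--     m = len(b)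
--     # bottom-up DP over suffixes: row[j] = max matching of remaining applicants vs b[j:]
--     row = [0] * (m + 1)
--     for ai in reversed(a):
--         new = [0] * (m + 1)
--         for j in range(m - 1, -1, -1):
--             best = max(row[j], new[j + 1])
--             if abs(ai - b[j]) <= k:
--                 best = max(best, 1 + row[j + 1])
--             new[j] = best
--         row = new
--     return row[0]
-- ===== Notes on version B (the rewrite author's own statement) =====
-- stated objective: alternative
-- what changed: Replaces A's greedy two-pointer merge by a bottom-up dynamic program over suffix pairs (a table row per applicant, max of skip-applicant / skip-apartment / match), which computes the maximum bipartite matching directly; equal to A by greedy-exchange lemmas on sorted lists.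
import Mathlib
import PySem

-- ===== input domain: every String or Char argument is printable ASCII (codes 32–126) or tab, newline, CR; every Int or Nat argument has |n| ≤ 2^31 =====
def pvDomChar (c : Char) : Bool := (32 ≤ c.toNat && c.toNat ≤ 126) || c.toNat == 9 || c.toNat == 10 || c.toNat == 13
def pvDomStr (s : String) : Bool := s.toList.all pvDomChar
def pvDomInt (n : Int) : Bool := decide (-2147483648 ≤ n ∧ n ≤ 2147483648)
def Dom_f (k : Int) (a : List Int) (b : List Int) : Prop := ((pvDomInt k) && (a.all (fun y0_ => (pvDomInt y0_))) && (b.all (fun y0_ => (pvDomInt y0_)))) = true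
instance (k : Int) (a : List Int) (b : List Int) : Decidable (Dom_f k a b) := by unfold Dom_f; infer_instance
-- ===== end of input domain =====

-- B replaces A's greedy two-pointer merge by a bottom-up dynamic program over suffix pairs
-- (objective 'alternative'; B is O(n*m), not faster). Both A and B sort a and b in place
-- (same side effect); the equivalence proved here is about the return value.

-- ===== PORT A =====
-- A's while over indices i,j ported as recursion consuming both lists; the branch order
-- and conditions are A's. The final 'else 0' is unreachable (the three tests are exhaustive).
def loopA (k : Int) (as_ bs : List Int) : Int :=
  match as_, bs with
  | [], _ => 0
  | _ :: _, [] => 0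
  | x :: xs, y :: ys =>
    if y - k ≤ x ∧ x ≤ y + k then 1 + loopA k xs ys
    else if x < y - k then loopA k xs (y :: ys)
    else if y + k < x then loopA k (x :: xs) ys
    else 0
termination_by (as_.length + bs.length)

def f (k : Int) (a : List Int) (b : List Int) : Int :=
  loopA k (PySem.List.sorted a (fun x => x) false) (PySem.List.sorted b (fun x => x) false)

-- ===== PORT B =====
-- B's inner 'for j in range(m-1,-1,-1)' building row new from row 'next' (= row i+1):
-- new[j] = max(next[j], new[j+1], match? 1+next[j+1]); built back-to-front as a recursion
-- over the suffix of sorted b paired with the matching suffix of the next row.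
def buildRow (k ai : Int) (bs next : List Int) : List Int :=
  match bs with
  | [] => [0]
  | y :: ys =>
    let vs := next.tail
    let rest := buildRow k ai ys vs
    let best := max (next.headD 0) (rest.headD 0)
    let best := if |ai - y| ≤ k then max best (1 + vs.headD 0) else best
    best :: rest

-- B's outer 'for ai in reversed(a)' starting from the all-zero row; answer = row[0].
def f_alt (k : Int) (a : List Int) (b : List Int) : Int :=
  let a' := PySem.List.sorted a (fun x => x) false
  let b' := PySem.List.sorted b (fun x => x) false
  (a'.foldr (fun ai row => buildRow k ai b' row) (List.replicate (b'.length + 1) 0)).headD 0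

-- ===== PRECONDITION & SPEC =====
def Spec_f (k : Int) (a : List Int) (b : List Int) (out : Int) : Prop := out = f_alt k a b
instance (k : Int) (a : List Int) (b : List Int) (out : Int) : Decidable (Spec_f k a b out) := by unfold Spec_f; infer_instance

-- ===== CLAIM =====
def Claim_equal_f : Prop := ∀ (k : Int) (a : List Int) (b : List Int), Dom_f k a b → Spec_f k a b (f k a b)

-- ===== LEMMAS AND PROOFS =====

-- mathematical maximum-matching DP on suffixes; B's table tabulates it, A's greedy equals it
def dp (k : Int) (as_ bs : List Int) : Int :=
  match as_, bs with
  | [], _ => 0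
  | _ :: _, [] => 0
  | x :: xs, y :: ys =>
    max (max (dp k xs (y :: ys)) (dp k (x :: xs) ys))
        (if y - k ≤ x ∧ x ≤ y + k then 1 + dp k xs ys else 0)
termination_by (as_.length + bs.length)

theorem dp_nil_right (k : Int) (as_ : List Int) : dp k as_ [] = 0 := by
  cases as_ <;> simp [dp]

theorem dp_nonneg (k : Int) (as_ bs : List Int) : 0 ≤ dp k as_ bs := by
  induction as_, bs using dp.induct k with
  | case1 => simp [dp]
  | case2 => simp [dp]
  | case3 x xs y ys ih1 ih2 ih3 =>
    simp only [dp, max_def]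
    split_ifs <;> omega

-- monotone: more apartments can only help
theorem dp_mono_b (k : Int) (as_ : List Int) (y : Int) (ys : List Int) :
    dp k as_ ys ≤ dp k as_ (y :: ys) := by
  cases as_ with
  | nil => simp [dp]
  | cons x xs =>
    have h := dp_nonneg k (x :: xs) ys
    simp only [dp, max_def]
    split_ifs <;> omega

-- monotone: more applicants can only help
theorem dp_mono_a (k : Int) (x : Int) (xs bs : List Int) :
    dp k xs bs ≤ dp k (x :: xs) bs := by
  cases bs with
  | nil => simp [dp_nil_right]
  | cons y ys =>
    have h := dp_nonneg k xs (y :: ys)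
    simp only [dp, max_def]
    split_ifs <;> omega

-- shape of tails: ys.tails = ys :: …
theorem tails_cons_shape (ys : List Int) : ∃ t, ys.tails = ys :: t := by
  cases ys <;> simp

-- one extra apartment adds at most one match
theorem dp_add_b (k : Int) (as_ : List Int) (y : Int) (ys : List Int) :
    dp k as_ (y :: ys) ≤ 1 + dp k as_ ys := by
  induction as_ generalizing y ys with
  | nil => simp [dp]
  | cons x xs ih =>
    have h1 := ih y ys
    have h2 := dp_mono_a k x xs ys
    have h3 := dp_mono_a k x xs (y :: ys)
    have h4 := dp_nonneg k (x :: xs) ys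
    conv_lhs => rw [dp]
    simp only [max_def]
    split_ifs <;> omega

-- one extra applicant adds at most one match
theorem dp_add_a (k : Int) (x : Int) (xs bs : List Int) :
    dp k (x :: xs) bs ≤ 1 + dp k xs bs := by
  induction bs with
  | nil => simp [dp_nil_right]
  | cons y ys ih =>
    have h2 := dp_mono_b k xs y ys
    have h3 := ih
    have h4 := dp_nonneg k xs (y :: ys)
    conv_lhs => rw [dp]
    simp only [max_def]
    split_ifs <;> omega

-- an applicant below every apartment's window matches nothing: dropping it is free
theorem dp_drop_a (k : Int) (x : Int) (xs bs : List Int)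
    (h : ∀ y ∈ bs, x < y - k) : dp k (x :: xs) bs = dp k xs bs := by
  induction bs with
  | nil => simp [dp_nil_right]
  | cons y ys ih =>
    have hy := h y (by simp)
    have ih' := ih (fun z hz => h z (by simp [hz]))
    have h2 := dp_mono_b k xs y ys
    have h3 := dp_nonneg k xs (y :: ys)
    have hnm : ¬ (y - k ≤ x ∧ x ≤ y + k) := by omega
    rw [dp, if_neg hnm, ih']
    simp only [max_def]
    split_ifs <;> omega

-- an apartment below every applicant's window matches nothing: dropping it is free
theorem dp_drop_b (k : Int) (as_ : List Int) (y : Int) (ys : List Int)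
    (h : ∀ x ∈ as_, y + k < x) : dp k as_ (y :: ys) = dp k as_ ys := by
  induction as_ with
  | nil => simp [dp]
  | cons x xs ih =>
    have hx := h x (by simp)
    have ih' := ih (fun z hz => h z (by simp [hz]))
    have h2 := dp_mono_a k x xs ys
    have h3 := dp_nonneg k (x :: xs) ys
    have hnm : ¬ (y - k ≤ x ∧ x ≤ y + k) := by omega
    rw [dp, if_neg hnm, ih']
    simp only [max_def]
    split_ifs <;> omega

-- greedy = DP on sorted inputs
theorem loopA_eq_dp (k : Int) (as_ bs : List Int)
    (ha : as_.Pairwise (· ≤ ·)) (hb : bs.Pairwise (· ≤ ·)) :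
    loopA k as_ bs = dp k as_ bs := by
  induction as_, bs using loopA.induct k with
  | case1 bs => simp [loopA, dp]
  | case2 x xs => simp [loopA, dp_nil_right]
  | case3 x xs y ys hm ih =>
    have ha' := (List.pairwise_cons.mp ha).2
    have hb' := (List.pairwise_cons.mp hb).2
    have h1 := dp_add_b k xs y ys
    have h2 := dp_add_a k x xs ys
    rw [loopA, dp, if_pos hm, if_pos hm, ih ha' hb']
    simp only [max_def]
    split_ifs <;> omega
  | case4 x xs y ys h1 h2 ih =>
    have ha' := (List.pairwise_cons.mp ha).2
    have hby := (List.pairwise_cons.mp hb).1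
    have hdrop : dp k (x :: xs) ys = dp k xs ys :=
      dp_drop_a k x xs ys (fun z hz => by have := hby z hz; omega)
    have hmono := dp_mono_b k xs y ys
    have hnn := dp_nonneg k xs (y :: ys)
    rw [loopA, dp, if_neg h1, if_neg h1, if_pos h2, ih ha' hb, hdrop]
    simp only [max_def]
    split_ifs <;> omega
  | case5 x xs y ys h1 h2 h3 ih =>
    have hax := (List.pairwise_cons.mp ha).1
    have hb' := (List.pairwise_cons.mp hb).2
    have hdrop : dp k xs (y :: ys) = dp k xs ys :=
      dp_drop_b k xs y ys (fun z hz => by have := hax z hz; omega)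
    have hmono := dp_mono_a k x xs ys
    have hnn := dp_nonneg k (x :: xs) ys
    rw [loopA, dp, if_neg h1, if_neg h1, if_neg h2, if_pos h3, ih ha hb', hdrop]
    simp only [max_def]
    split_ifs <;> omega
  | case6 x xs y ys h1 h2 h3 => omega

-- B's row builder tabulates dp over the tails of bs
theorem buildRow_spec (k x : Int) (xs bs : List Int) :
    buildRow k x bs (bs.tails.map (fun t => dp k xs t)) =
      bs.tails.map (fun t => dp k (x :: xs) t) := by
  induction bs with
  | nil => simp [buildRow, dp]
  | cons y ys ih =>
    obtain ⟨t, ht⟩ := tails_cons_shape ys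
    simp only [buildRow, List.tails_cons, List.map_cons, List.tail_cons]
    rw [ih, ht]
    simp only [List.map_cons, List.headD_cons]
    congr 1
    have habs : (|x - y| ≤ k) ↔ (y - k ≤ x ∧ x ≤ y + k) := by rw [abs_le]; omega
    have hnn1 := dp_nonneg k xs (y :: ys)
    have hnn2 := dp_nonneg k (x :: xs) ys
    rw [dp]
    simp only [max_def]
    split_ifs <;> omega

theorem foldr_rows (k : Int) (as_ bs : List Int) :
    as_.foldr (fun ai row => buildRow k ai bs row) (List.replicate (bs.length + 1) 0) =
      bs.tails.map (fun t => dp k as_ t) := by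
  induction as_ with
  | nil =>
    have : bs.tails.map (fun t => dp k ([] : List Int) t) =
        bs.tails.map (fun _ => (0 : Int)) := by
      apply List.map_congr_left; intro t _; simp [dp]
    rw [List.foldr_nil, this, List.map_const', List.length_tails]
  | cons x xs ih =>
    rw [List.foldr_cons, ih, buildRow_spec]

-- ===== VERDICT =====
theorem f_spec : Claim_equal_f := by
  intro k a b _
  unfold Spec_f f f_alt
  rw [loopA_eq_dp k _ _ (PySem.List.sorted_pairwise a (fun x => x))
    (PySem.List.sorted_pairwise b (fun x => x))]
  obtain ⟨t, ht⟩ := tails_cons_shape (PySem.List.sorted b (fun x => x) false)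
  simp only [foldr_rows, ht, List.map_cons, List.headD_cons]
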